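-- pv_equiv track=rewrite | github.com/tailaiying32/ROMA-Active-Learning | test/diagnostics/run_legacy_diagnosis.py | get_plot_schedule
-- ===== SOURCE A (Python) =====
-- def get_plot_schedule(budget):
--     """
--     Generate iteration indices to plot.
--     Rule:
--     - 0-49: Every iteration
--     - 50+: Every 10 iterations
--     """
--     schedule = []
--     for i in range(budget):
--         if i < 50:
--             schedule.append(i)
--         else:
--             if i % 10 == 0:
--                 schedule.append(i)
--     return schedule
-- ===== SOURCE B (Python) =====
-- def get_plot_schedule(budget):
--     """
--     Generate iteration indices to plot.
--     Rule:
--     - 0-49: Every iteration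
--     - 50+: Every 10 iterations
--     """
--     return list(range(min(budget, 50))) + list(range(50, budget, 10))
-- ===== Notes on version B (the rewrite author's own statement) =====
-- stated objective: simpler
-- what changed: B returns the concatenation of two arithmetic ranges (the contiguous prefix and the strided tail) instead of A's per-iteration loop with a modulo test and branch.
import Mathlib
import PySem

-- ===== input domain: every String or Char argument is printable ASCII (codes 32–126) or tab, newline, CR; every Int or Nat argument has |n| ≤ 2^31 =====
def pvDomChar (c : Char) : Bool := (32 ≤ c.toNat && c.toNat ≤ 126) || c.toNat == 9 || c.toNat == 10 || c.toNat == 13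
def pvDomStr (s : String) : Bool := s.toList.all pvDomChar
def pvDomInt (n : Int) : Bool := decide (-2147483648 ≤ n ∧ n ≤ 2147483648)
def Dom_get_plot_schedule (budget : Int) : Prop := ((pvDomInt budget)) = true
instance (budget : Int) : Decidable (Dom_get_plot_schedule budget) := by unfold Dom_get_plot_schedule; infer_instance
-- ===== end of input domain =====

-- B replaces A's filtering loop (per-iteration modulo test and branch) by the concatenation of
-- two arithmetic ranges; equally simple, no speed claim beyond skipping non-multiples.

-- ===== PORT A =====
def get_plot_schedule (budget : Int) : List Int :=
  (PySem.List.pyRange 0 budget 1).foldl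
    (fun schedule i =>
      if i < 50 then schedule ++ [i]
      else if PySem.Int.mod i 10 = 0 then schedule ++ [i]
      else schedule)
    []

-- ===== PORT B =====
def get_plot_schedule_alt (budget : Int) : List Int :=
  PySem.List.pyRange 0 (min budget 50) 1 ++ PySem.List.pyRange 50 budget 10

-- ===== PRECONDITION & SPEC =====
def Spec_get_plot_schedule (budget : Int) (out : List Int) : Prop := out = get_plot_schedule_alt budget
instance (budget : Int) (out : List Int) : Decidable (Spec_get_plot_schedule budget out) := by unfold Spec_get_plot_schedule; infer_instance

-- ===== CLAIM (what is proved, stated in full; the proofs are below) =====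
def Claim_equal_get_plot_schedule : Prop := ∀ (budget : Int), Dom_get_plot_schedule budget → Spec_get_plot_schedule budget (get_plot_schedule budget)

-- ===== LEMMAS AND PROOFS =====

-- multiples of 10 below N, as a filtered range and as a mapped range
lemma filter_range_dvd (N : Nat) :
    (List.range N).filter (fun k => decide ((10:Nat) ∣ k)) =
      (List.range ((N + 9) / 10)).map (fun k => 10 * k) := by
  induction N with
  | zero => simp
  | succ N ih =>
    rw [List.range_succ, List.filter_append, ih]
    by_cases h : (10:Nat) ∣ N
    · have hc : (N + 1 + 9) / 10 = (N + 9) / 10 + 1 := by omega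
      have hm : 10 * ((N + 9) / 10) = N := by omega
      rw [hc, List.range_succ, List.map_append]
      simp [h, hm]
    · have hc : (N + 1 + 9) / 10 = (N + 9) / 10 := by omega
      simp [h, hc]

-- an empty strided tail when budget ≤ 50
lemma pyRange_ten_nil {b : Int} (h : b ≤ 50) : PySem.List.pyRange 50 b 10 = [] := by
  rw [PySem.List.pyRange_of_pos 50 b (by norm_num)]
  rw [if_neg (by omega)]
  simp

-- the strided range is the filter of the unit range
lemma filter_mod_eq_pyRange_ten {b : Int} (hb : 50 ≤ b) :
    (PySem.List.pyRange 50 b 1).filter (fun i => decide (PySem.Int.mod i 10 = 0)) =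
      PySem.List.pyRange 50 b 10 := by
  rw [PySem.List.pyRange_one, List.filter_map]
  have hpred : ((fun i => decide (PySem.Int.mod i 10 = 0)) ∘ fun k : Nat => (50:Int) + k)
      = fun k : Nat => decide ((10:Nat) ∣ k) := by
    funext k
    simp only [Function.comp, PySem.Int.mod, decide_eq_decide]
    rw [Int.fmod_eq_emod]
    rw [if_pos (Or.inl (by norm_num))]
    omega
  rw [hpred, filter_range_dvd, List.map_map]
  rw [PySem.List.pyRange_of_pos 50 b (by norm_num)]
  have hcount : ((b - 50).toNat + 9) / 10 = (if (50:Int) < b then ((b - 50 + 10 - 1) / 10).toNat else 0) := by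
    split <;> omega
  rw [hcount]
  apply List.map_congr_left
  intro k _
  simp only [Function.comp]
  push_cast
  ring

theorem get_plot_schedule_spec : Claim_equal_get_plot_schedule := by
  intro budget _
  unfold Spec_get_plot_schedule get_plot_schedule get_plot_schedule_alt
  rw [PySem.List.foldl_congr_mem _ _
      (fun schedule i => if (i < 50 ∨ PySem.Int.mod i 10 = 0) then schedule ++ [i] else schedule) _
      (by
        intro acc i _
        by_cases h1 : i < 50
        · simp [h1]
        · by_cases h2' : PySem.Int.mod i 10 = 0 <;> simp [h1, h2'])]
  rw [PySem.List.foldl_append_ite_eq_filter]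
  by_cases hb : budget ≤ 50
  · rw [min_eq_left hb, pyRange_ten_nil hb, List.append_nil, List.nil_append]
    apply List.filter_eq_self.mpr
    intro i hi
    have := (PySem.List.mem_pyRange_one).mp hi
    simp only [decide_eq_true_eq]
    left; omega
  · rw [not_le] at hb
    rw [min_eq_right (by omega : (50:Int) ≤ budget)]
    rw [PySem.List.pyRange_one_append 0 50 budget (by norm_num) (by omega), List.filter_append,
        List.nil_append]
    have h1 : (PySem.List.pyRange 0 50).filter (fun i => decide (i < 50 ∨ PySem.Int.mod i 10 = 0))
        = PySem.List.pyRange 0 50 := by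
      apply List.filter_eq_self.mpr
      intro i hi
      have := (PySem.List.mem_pyRange_one).mp hi
      simp only [decide_eq_true_eq]
      left; omega
    have h2 : (PySem.List.pyRange 50 budget).filter (fun i => decide (i < 50 ∨ PySem.Int.mod i 10 = 0))
        = PySem.List.pyRange 50 budget 10 := by
      have hc : ∀ i ∈ PySem.List.pyRange 50 budget,
          (decide (i < 50 ∨ PySem.Int.mod i 10 = 0)) = decide (PySem.Int.mod i 10 = 0) := by
        intro i hi
        have := (PySem.List.mem_pyRange_one).mp hi
        simp only [decide_eq_decide]
        constructor
        · rintro (h | h)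
          · omega
          · exact h
        · intro h; right; exact h
      rw [List.filter_congr hc]
      exact filter_mod_eq_pyRange_ten (by omega)
    rw [h1, h2]
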